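-- pv_equiv track=rewrite | github.com/dkphd/GP_Ensembling | gp.py | first_uniques
-- ===== SOURCE A (Python) =====
-- def first_uniques(arr):
--
--     mask = []
--     for index, item in enumerate(arr):
--         if item not in arr[:index]:
--             mask.append(True)
--         else:
--             mask.append(False)
--
--     return mask
-- ===== SOURCE B (Python) =====
-- def first_uniques(arr):
--     # Pass 1: table of each element's first-occurrence index.
--     first = {}
--     for index, item in enumerate(arr):
--         first.setdefault(item, index)
--     # Pass 2: True exactly where the current index is the stored first index.
--     return [first[item] == index for index, item in enumerate(arr)]
-- ===== Notes on version B (the rewrite author's own statement) =====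
-- stated objective: faster
-- what changed: A makes one pass that rescans the prefix arr[:index] for every element; B is two staged passes: it first builds a dict mapping each element to its first-occurrence index via setdefault, then emits the mask by comparing each position against that table, so no membership scan over a growing collection remains.
import Mathlib
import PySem

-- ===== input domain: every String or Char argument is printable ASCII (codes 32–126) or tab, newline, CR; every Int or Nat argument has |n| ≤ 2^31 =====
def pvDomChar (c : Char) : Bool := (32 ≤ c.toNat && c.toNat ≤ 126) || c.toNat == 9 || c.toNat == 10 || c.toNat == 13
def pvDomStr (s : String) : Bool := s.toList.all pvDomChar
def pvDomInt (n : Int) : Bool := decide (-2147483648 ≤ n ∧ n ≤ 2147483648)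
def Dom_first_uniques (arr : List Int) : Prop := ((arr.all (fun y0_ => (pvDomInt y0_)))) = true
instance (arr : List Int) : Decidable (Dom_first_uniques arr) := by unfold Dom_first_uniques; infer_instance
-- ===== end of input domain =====

-- B replaces A's per-element prefix rescans by two staged passes: a setdefault-built first-occurrence index table, then one comparison pass (asymptotically faster).


-- ===== PORT A =====
-- for index, item in enumerate(arr): mask.append(item not in arr[:index])
def first_uniques (arr : List Int) : List Bool :=
  (PySem.List.enumerate arr 0).foldl
    (fun mask p =>
      if (PySem.List.slice arr none (some p.1)).contains p.2 then mask ++ [false]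
      else mask ++ [true]) []

-- ===== PORT B =====
-- pass 1: first = {}; for index, item in enumerate(arr): first.setdefault(item, index)
def fuFirst (arr : List Int) : PySem.Dict Int Int :=
  (PySem.List.enumerate arr 0).foldl (fun d p => d.setdefault p.2 p.1) PySem.Dict.empty
-- pass 2: [first[item] == index for index, item in enumerate(arr)]
-- first[item] never raises (every item of arr is a key of the table built in pass 1),
-- so Python's first[item] == index is exactly get? = some index here.
def first_uniques_alt (arr : List Int) : List Bool :=
  (PySem.List.enumerate arr 0).map (fun p => (fuFirst arr).get? p.2 == some p.1)

-- ===== PRECONDITION & SPEC =====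
def Spec_first_uniques (arr : List Int) (out : List Bool) : Prop := out = first_uniques_alt arr
instance (arr : List Int) (out : List Bool) : Decidable (Spec_first_uniques arr out) := by unfold Spec_first_uniques; infer_instance

-- ===== CLAIM (what is proved, stated in full; the proofs are below) =====
def Claim_equal_first_uniques : Prop := ∀ (arr : List Int), Dom_first_uniques arr → Spec_first_uniques arr (first_uniques arr)

-- ===== LEMMAS AND PROOFS =====

-- The k-th entry of enumerate is (s + k, l[k]) (getElem? form).
theorem fu_enum_getElem? {α : Type} : ∀ (l : List α) (s : Int) (k : Nat),
    (PySem.List.enumerate l s)[k]? = (l[k]?).map (fun x => (s + (k : Int), x)) := by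
  intro l
  induction l with
  | nil => intro s k; simp [PySem.List.enumerate]
  | cons x l ih =>
    intro s k
    rw [PySem.List.enumerate_cons]
    cases k with
    | zero => simp
    | succ k =>
      simp only [List.getElem?_cons_succ, ih (s + 1) k]
      cases l[k]? with
      | none => rfl
      | some v =>
        simp only [Option.map_some, Option.some.injEq, Prod.mk.injEq]
        exact ⟨by push_cast; ring, trivial⟩

theorem fu_enum_getElem {α : Type} (l : List α) (s : Int) (k : Nat) (hk : k < l.length) :
    (PySem.List.enumerate l s)[k]'(by rw [PySem.List.length_enumerate]; exact hk) = (s + (k : Int), l[k]) := by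
  have h1 := fu_enum_getElem? l s k
  rw [List.getElem?_eq_getElem (by rw [PySem.List.length_enumerate]; exact hk),
      List.getElem?_eq_getElem hk] at h1
  simpa using h1

-- What the setdefault pass computes: existing keys keep their value, fresh keys
-- get s + (their first index in the remaining list).
theorem fu_get?_fold (x : Int) : ∀ (l : List Int) (s : Int) (d : PySem.Dict Int Int),
    ((PySem.List.enumerate l s).foldl (fun d p => d.setdefault p.2 p.1) d).get? x
      = (d.get? x).or ((l.idxOf? x).map (fun k => s + (k : Int))) := by
  intro l
  induction l with
  | nil => intro s d; simp [PySem.List.enumerate]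
  | cons y l ih =>
    intro s d
    rw [PySem.List.enumerate_cons]
    simp only [List.foldl_cons]
    rw [ih (s + 1) (d.setdefault y s)]
    by_cases hxy : x = y
    · subst hxy
      rw [PySem.Dict.get?_setdefault_self]
      simp only [List.idxOf?_cons, BEq.rfl]
      cases h : d.get? x with
      | none => simp
      | some v => simp
    · rw [PySem.Dict.get?_setdefault_of_ne d s hxy]
      have hy : ((y == x) = true) = False := by simp [Ne.symm hxy]
      simp only [List.idxOf?_cons, hy, if_false]
      cases hd : d.get? x with
      | some v => simp
      | none =>
        simp only [Option.none_or]
        cases h : List.idxOf? x l with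
        | none => simp
        | some k =>
          simp
          omega

-- The table's lookup is exactly the first-occurrence index.
theorem fu_first_get? (arr : List Int) (x : Int) :
    (fuFirst arr).get? x = (arr.idxOf? x).map (fun k => (k : Int)) := by
  unfold fuFirst
  rw [fu_get?_fold x arr 0 PySem.Dict.empty]
  simp

-- Per position: "first index = current index" iff "not in the strict prefix".
theorem fu_bit_eq (arr : List Int) (k : Nat) (hk : k < arr.length) :
    ((fuFirst arr).get? arr[k] == some ((0 : Int) + (k : Int)))
      = !(arr.take k).contains arr[k] := by
  rw [fu_first_get?]
  by_cases hmem : arr[k] ∈ arr.take k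
  · -- some earlier index holds arr[k]: the first index is < k
    rcases List.getElem_of_mem hmem with ⟨j, hj, hje⟩
    have hjk : j < k := lt_of_lt_of_le hj (by simp [List.length_take])
    rw [List.getElem_take] at hje
    have hx : arr[k] ∈ arr := List.getElem_mem hk
    cases h : arr.idxOf? arr[k] with
    | none => exact absurd (List.idxOf?_eq_none_iff.mp h) (by simp [hx])
    | some i =>
      rcases List.idxOf?_eq_some_iff.mp h with ⟨hi, _, hfirst⟩
      have hik : i ≠ k := by
        intro hik; subst hik
        exact hfirst j hjk hje
      simp only [List.contains_eq_mem, hmem, decide_true, Bool.not_true]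
      simp
      omega
  · -- arr[k] is fresh at k: k is the first index
    have h : arr.idxOf? arr[k] = some k := by
      rw [List.idxOf?_eq_some_iff]
      refine ⟨hk, rfl, ?_⟩
      intro j hjk hje
      apply hmem
      have hj' : j < (List.take k arr).length := by simp; omega
      have he : (List.take k arr)[j]'hj' = arr[k] := by rw [List.getElem_take]; exact hje
      exact he ▸ List.getElem_mem hj'
    rw [h]
    simp [hmem]

-- ===== VERDICT (by name: the statement is the Claim_ definition above) =====
theorem first_uniques_spec : Claim_equal_first_uniques := by
  intro arr _
  unfold Spec_first_uniques first_uniques first_uniques_alt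
  -- A's appended branches are one appended bit
  have hbody : (fun (mask : List Bool) (p : Int × Int) =>
      if (PySem.List.slice arr none (some p.1)).contains p.2 then mask ++ [false]
      else mask ++ [true])
    = fun mask p => mask ++ [if (PySem.List.slice arr none (some p.1)).contains p.2 then false else true] := by
    funext mask p; split_ifs <;> rfl
  rw [hbody, PySem.List.foldl_append_singleton_eq_map, List.nil_append]
  apply List.ext_getElem (by simp [PySem.List.length_enumerate])
  intro k hk₁ hk₂
  have hk : k < arr.length := by simpa [PySem.List.length_enumerate] using hk₂
  simp only [List.getElem_map, fu_enum_getElem arr 0 k hk]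
  have hsl : PySem.List.slice arr none (some ((0 : Int) + (k : Int))) = arr.take k := by
    have : (0 : Int) + (k : Int) = ((k : Nat) : Int) := by ring
    rw [this, PySem.List.slice_to_natCast]
  rw [hsl, fu_bit_eq arr k hk]
  split_ifs with h <;> simp_all
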